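-- pv_equiv track=rewrite | github.com/collinsakenga/codewars_solutions | 6 kyu/Simple Fun 303 Prime Product.py | prime_product
-- ===== SOURCE A (Python) =====
-- def prime_product(n):
--     low=n//2
--     high=(n+1)//2
--     while low>=0 and high<=n:
--         if is_prime(low) and is_prime(high):
--             return low*high
--         low-=1
--         high+=1
--     return 0
--
-- def is_prime(n):
--     if n<=1 or (n!=2 and n%2==0) or (n!=3 and n%3==0):
--         return False
--     for i in range(3, int(n**0.5)+1, 2):
--         if n%i==0:
--             return False
--     return True
-- ===== SOURCE B (Python) =====
-- def prime_product(n):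
--     if n < 4:
--         return 0
--     # integer sqrt without floats: largest limit with limit*limit <= n
--     limit = 1
--     while (limit + 1) * (limit + 1) <= n:
--         limit += 1
--     # sieve of Eratosthenes up to limit: all primes <= sqrt(n)
--     sieve = [True] * (limit + 1)
--     primes = []
--     for p in range(2, limit + 1):
--         if sieve[p]:
--             primes.append(p)
--             for j in range(p * p, limit + 1, p):
--                 sieve[j] = False
--
--     def isp(k):
--         if k < 2:
--             return False
--         for p in primes:
--             if p * p > k:
--                 break
--             if k % p == 0:
--                 return False
--         return True
--
--     if n % 2 == 1:
--         # odd n: a prime pair summing to n must contain the even prime 2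
--         return 2 * (n - 2) if isp(n - 2) else 0
--     low = n // 2
--     while low >= 2:
--         if isp(low) and isp(n - low):
--             return low * (n - low)
--         low -= 1
--     return 0
-- ===== Notes on version B (the rewrite author's own statement) =====
-- stated objective: faster
-- what changed: B replaces per-candidate odd trial division with a sieve of Eratosthenes up to sqrt(n) (trial division by primes only), and resolves odd n directly via the pair (2, n-2) instead of A's Theta(n) center-out scan that can only succeed at low=2.
import Mathlib
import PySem

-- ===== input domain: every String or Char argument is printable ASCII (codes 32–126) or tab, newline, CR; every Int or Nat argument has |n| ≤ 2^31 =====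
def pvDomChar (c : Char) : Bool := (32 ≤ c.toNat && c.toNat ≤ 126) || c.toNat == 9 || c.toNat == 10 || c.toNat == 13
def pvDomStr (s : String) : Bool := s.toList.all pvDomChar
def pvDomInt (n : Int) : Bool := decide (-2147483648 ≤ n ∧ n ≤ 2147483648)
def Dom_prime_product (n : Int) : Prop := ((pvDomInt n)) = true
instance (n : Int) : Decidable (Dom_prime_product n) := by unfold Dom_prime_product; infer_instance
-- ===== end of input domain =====

-- B replaces A's per-candidate odd trial division with a sieve of the primes up to sqrt(n)
-- (trial division by primes only) and resolves odd n directly through the only possible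
-- pair (2, n-2) instead of A's center-out scan; objective: faster.

-- ===== PORT A =====
-- is_prime(n); 'int(n**0.5)' is ported as Nat.sqrt, exact on the domain 0 ≤ n ≤ 2^31 (the
-- correctly-rounded double sqrt floors to the integer sqrt there; the branch needs n ≥ 2).
def pvIsPrimeA (n : Int) : Bool :=
  if n ≤ 1 || (!(n == 2) && PySem.Int.mod n 2 == 0) || (!(n == 3) && PySem.Int.mod n 3 == 0) then
    false
  else
    (PySem.List.pyRange 3 ((Nat.sqrt n.toNat : Int) + 1) 2).all (fun i => !(PySem.Int.mod n i == 0))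

-- the 'while low>=0 and high<=n' loop of prime_product
def pvLoopA (n low high : Int) : Int :=
  if h : 0 ≤ low ∧ high ≤ n then
    if pvIsPrimeA low && pvIsPrimeA high then low * high
    else pvLoopA n (low - 1) (high + 1)
  else 0
termination_by (low + 1).toNat
decreasing_by omega

def prime_product (n : Int) : Int :=
  pvLoopA n (PySem.Int.floordiv n 2) (PySem.Int.floordiv (n + 1) 2)

-- ===== PORT B =====
-- 'limit = 1; while (limit+1)*(limit+1) <= n: limit += 1'  (values stay nonnegative: Nat)
def pvFindLimit (N limit : Nat) : Nat :=
  if (limit + 1) * (limit + 1) ≤ N then pvFindLimit N (limit + 1) else limit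
termination_by N - limit
decreasing_by
  have h1 : limit + 1 ≤ (limit + 1) * (limit + 1) := Nat.le_mul_of_pos_left _ (by omega)
  omega

-- 'for j in range(p*p, limit+1, p): sieve[j] = False'  (0 < p is a totality guard; always true at call sites)
def pvMark (s : Array Bool) (j p bound : Nat) : Array Bool :=
  if h : 0 < p ∧ j ≤ bound then pvMark (s.set! j false) (j + p) p bound else s
termination_by bound + 1 - j

-- 'for p in range(2, limit+1): if sieve[p]: primes.append(p); mark multiples'  (returns the primes list; the sieve array is dead after the loop)
def pvSieve (bound p : Nat) (s : Array Bool) (primes : List Nat) : List Nat :=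
  if p ≤ bound then
    if s[p]! then pvSieve bound (p + 1) (pvMark s (p * p) p bound) (primes ++ [p])
    else pvSieve bound (p + 1) s primes
  else primes
termination_by bound + 1 - p

-- 'for p in primes: if p*p > k: break; if k % p == 0: return False / return True'
def pvIspLoop (k : Int) : List Nat → Bool
  | [] => true
  | p :: ps =>
    if k < (p : Int) * (p : Int) then true
    else if PySem.Int.mod k (p : Int) == 0 then false
    else pvIspLoop k ps

def pvIsp (primes : List Nat) (k : Int) : Bool :=
  if k < 2 then false else pvIspLoop k primes

-- 'low = n // 2; while low >= 2: …'
def pvScan (n : Int) (primes : List Nat) (low : Int) : Int :=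
  if 2 ≤ low then
    if pvIsp primes low && pvIsp primes (n - low) then low * (n - low)
    else pvScan n primes (low - 1)
  else 0
termination_by low.toNat
decreasing_by omega

def prime_product_alt (n : Int) : Int :=
  if n < 4 then 0
  else
    let limit := pvFindLimit n.toNat 1
    let primes := pvSieve limit 2 (Array.replicate (limit + 1) true) []
    if PySem.Int.mod n 2 == 1 then
      if pvIsp primes (n - 2) then 2 * (n - 2) else 0
    else pvScan n primes (PySem.Int.floordiv n 2)

-- ===== PRECONDITION & SPEC =====
def Spec_prime_product (n : Int) (out : Int) : Prop := out = prime_product_alt n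
instance (n : Int) (out : Int) : Decidable (Spec_prime_product n out) := by unfold Spec_prime_product; infer_instance

-- ===== CLAIM (what is proved, stated in full; the proofs are below) =====
def Claim_equal_prime_product : Prop := ∀ (n : Int), Dom_prime_product n → Spec_prime_product n (prime_product n)

-- ===== LEMMAS AND PROOFS =====

lemma pvFindLimit_spec (N limit : Nat) (h : limit * limit ≤ N) :
    pvFindLimit N limit * pvFindLimit N limit ≤ N ∧
      N < (pvFindLimit N limit + 1) * (pvFindLimit N limit + 1) ∧ limit ≤ pvFindLimit N limit := by
  fun_induction pvFindLimit N limit with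
  | case1 l hif ih =>
    have := ih hif
    exact ⟨this.1, this.2.1, by omega⟩
  | case2 l hif => exact ⟨h, by omega, le_refl _⟩

lemma pvMark_size (s : Array Bool) (j p bound : Nat) : (pvMark s j p bound).size = s.size := by
  fun_induction pvMark s j p bound with
  | case1 s j h ih => simpa [Array.set!] using ih
  | case2 => rfl

lemma pvMark_get (s : Array Bool) (j p bound k : Nat) (hp : 0 < p) (hk : k < s.size) :
    (pvMark s j p bound)[k]! = if j ≤ k ∧ k ≤ bound ∧ p ∣ (k - j) then false else s[k]! := by
  fun_induction pvMark s j p bound with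
  | case1 s j h ih =>
    have hk' : k < (s.set! j false).size := by simpa [Array.set!] using hk
    rw [ih hk']
    have hget : (s.set! j false)[k]! = if j = k then false else s[k]! := by
      simp [Array.set!, Array.getElem!_eq_getD, Array.getD, hk, Array.getElem_setIfInBounds]
    rw [hget]
    by_cases hkj : j = k
    · subst hkj
      have : j ≤ j ∧ j ≤ bound ∧ p ∣ j - j := ⟨le_refl _, h.2, by simp⟩
      simp only [this, if_pos]
      by_cases hc : j + p ≤ j ∧ j ≤ bound ∧ p ∣ j - (j + p) <;> simp [hc]
    · by_cases hge : j + p ≤ k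
      · have hdvd : p ∣ k - (j + p) ↔ p ∣ k - j := by
          constructor
          · intro hd
            have he : k - j = (k - (j + p)) + p := by omega
            rw [he]; exact Nat.dvd_add hd dvd_rfl
          · intro hd
            have he : k - (j + p) = (k - j) - p := by omega
            rw [he]; exact Nat.dvd_sub hd dvd_rfl
        by_cases hcond : j + p ≤ k ∧ k ≤ bound ∧ p ∣ k - (j + p)
        · have hc2 : j ≤ k ∧ k ≤ bound ∧ p ∣ k - j := ⟨by omega, hcond.2.1, hdvd.mp hcond.2.2⟩
          simp [hcond, hc2, hkj]
        · have hc2 : ¬(j ≤ k ∧ k ≤ bound ∧ p ∣ k - j) := by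
            intro h'
            exact hcond ⟨hge, h'.2.1, hdvd.mpr h'.2.2⟩
          simp [hcond, hc2, hkj]
      · have hno : ¬(j ≤ k ∧ k ≤ bound ∧ p ∣ k - j) := by
          intro h'
          have hne : k - j ≠ 0 := by omega
          have := Nat.le_of_dvd (by omega) h'.2.2
          omega
        have hno2 : ¬(j + p ≤ k ∧ k ≤ bound ∧ p ∣ k - (j + p)) := by intro h'; omega
        simp [hno, hno2, hkj]
  | case2 s j h =>
    have hno : ¬(j ≤ k ∧ k ≤ bound ∧ p ∣ k - j) := by
      intro h'
      exact h ⟨hp, by omega⟩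
    simp [hno]

lemma pvPrimeChar (t m : Nat) (h2 : 2 ≤ t) (hm : t < m * m) :
    (∀ q, Nat.Prime q → q < m → q * q ≤ t → ¬ q ∣ t) ↔ Nat.Prime t := by
  constructor
  · intro h
    by_contra hnp
    have hq := Nat.minFac_prime (show t ≠ 1 by omega)
    have hsq : t.minFac ^ 2 ≤ t := Nat.minFac_sq_le_self (by omega) hnp
    have hsq' : t.minFac * t.minFac ≤ t := by nlinarith [sq_nonneg t.minFac, hsq, sq (t.minFac)]
    have hlt : t.minFac < m := by nlinarith
    exact h _ hq hlt hsq' (Nat.minFac_dvd t)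
  · intro hpt q hq hqm hqsq hdvd
    rcases (Nat.Prime.eq_one_or_self_of_dvd hpt q hdvd) with h1 | h1
    · exact Nat.Prime.one_lt hq |>.ne' h1
    · subst h1; nlinarith

lemma pvSieve_primes (bound : Nat) : ∀ (fuel p : Nat) (s : Array Bool) (primes : List Nat),
    fuel = bound + 1 - p → 2 ≤ p → p ≤ bound + 1 → s.size = bound + 1 →
    (∀ k, 2 ≤ k → k ≤ bound →
      (s[k]! = true ↔ ∀ q, Nat.Prime q → q < p → q * q ≤ k → ¬ q ∣ k)) →
    primes = (List.range p).filter (fun q => decide (Nat.Prime q)) →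
    pvSieve bound p s primes = (List.range (bound + 1)).filter (fun q => decide (Nat.Prime q)) := by
  intro fuel
  induction fuel using Nat.strong_induction_on with
  | _ fuel ih =>
  intro p s primes hfuel hp hple hs hinv hpr
  rw [pvSieve]
  by_cases hpb : p ≤ bound
  · rw [if_pos hpb]
    by_cases hsp : s[p]! = true
    · rw [if_pos hsp]
      have hprime : Nat.Prime p := by
        have h1 := (hinv p hp hpb).mp hsp
        exact (pvPrimeChar p p hp (by nlinarith)).mp h1
      refine ih (bound + 1 - (p + 1)) (by omega) (p + 1) _ _ rfl (by omega) (by omega)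
        (by rw [pvMark_size]; exact hs) ?_ ?_
      · intro k h2k hkb
        have hk : k < s.size := by omega
        rw [pvMark_get s (p * p) p bound k (by omega) hk]
        constructor
        · intro hval q hq hqlt hqsq hqdvd
          by_cases hqp : q = p
          · subst hqp
            have hcond : q * q ≤ k ∧ k ≤ bound ∧ q ∣ k - q * q :=
              ⟨hqsq, hkb, Nat.dvd_sub hqdvd (dvd_mul_left q q)⟩
            simp [hcond] at hval
          · have hlt : q < p := by omega
            split at hval
            · exact absurd hval (by simp)
            · exact (hinv k h2k hkb).mp hval q hq hlt hqsq hqdvd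
        · intro hall
          have hnot : ¬(p * p ≤ k ∧ k ≤ bound ∧ p ∣ k - p * p) := by
            intro ⟨ha, hb, hc⟩
            have hdk : p ∣ k := by
              have he : k = (k - p * p) + p * p := by omega
              rw [he]; exact Nat.dvd_add hc (Dvd.intro p rfl)
            exact hall p hprime (by omega) ha hdk
          rw [if_neg hnot]
          exact (hinv k h2k hkb).mpr (fun q hq hqlt => hall q hq (by omega))
      · rw [hpr, List.range_succ, List.filter_append]
        simp [hprime]
    · rw [if_neg hsp]
      have hnprime : ¬ Nat.Prime p := by
        intro hprime
        apply hsp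
        exact (hinv p hp hpb).mpr <| by
          rw [pvPrimeChar p p hp (by nlinarith)]; exact hprime
      refine ih (bound + 1 - (p + 1)) (by omega) (p + 1) _ _ rfl (by omega) (by omega) hs ?_ ?_
      · intro k h2k hkb
        rw [hinv k h2k hkb]
        constructor
        · intro hall q hq hqlt hqsq
          by_cases hqp : q = p
          · subst hqp; exact absurd hq hnprime
          · exact hall q hq (by omega) hqsq
        · intro hall q hq hqlt hqsq
          exact hall q hq (by omega) hqsq
      · rw [hpr, List.range_succ, List.filter_append]
        simp [hnprime]
  · rw [if_neg hpb, hpr]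
    have he : p = bound + 1 := by omega
    rw [he]

lemma pvSieve_init (bound : Nat) (hb : 1 ≤ bound) :
    pvSieve bound 2 (Array.replicate (bound + 1) true) [] =
      (List.range (bound + 1)).filter (fun q => decide (Nat.Prime q)) := by
  apply pvSieve_primes bound (bound + 1 - 2) 2 _ _ rfl (le_refl _) (by omega) (by simp)
  · intro k h2k hkb
    have : (Array.replicate (bound + 1) true)[k]! = true := by
      simp [Array.getElem!_eq_getD, Array.getD, hkb, Nat.lt_succ_of_le hkb]
    rw [this]
    simp only [true_iff]
    intro q hq hqlt
    have := hq.two_le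
    omega
  · decide

lemma pvIspLoop_eq (k : Int) (L : List Nat) (hL : L.Pairwise (· < ·)) :
    (pvIspLoop k L = true ↔ ∀ p ∈ L, (p : Int) * (p : Int) ≤ k → ¬ ((p : Int) ∣ k)) := by
  induction L with
  | nil => simp [pvIspLoop]
  | cons p ps ihp =>
    rw [List.pairwise_cons] at hL
    rw [pvIspLoop]
    by_cases hlt : k < (p : Int) * (p : Int)
    · rw [if_pos hlt]
      simp only [true_iff]
      intro q hq hqle
      rcases List.mem_cons.mp hq with hq' | hq'
      · subst hq'; omega
      · exfalso
        have hpq : p < q := hL.1 q hq'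
        have hcast : (p : Int) * (p : Int) ≤ (q : Int) * (q : Int) := by
          have : p * p ≤ q * q := Nat.mul_le_mul (by omega) (by omega)
          exact_mod_cast this
        omega
    · rw [if_neg hlt]
      by_cases hdvd : (p : Int) ∣ k
      · have hc : PySem.Int.mod k (p : Int) == 0 := by
          simp [PySem.Int.mod_eq_zero_iff_dvd, hdvd]
        rw [if_pos hc]
        simp only [Bool.false_eq_true, false_iff]
        intro hall
        exact hall p (List.mem_cons_self ..) (by omega) hdvd
      · have hc : ¬(PySem.Int.mod k (p : Int) == 0) := by
          simp [PySem.Int.mod_eq_zero_iff_dvd, hdvd]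
        rw [if_neg hc]
        rw [ihp hL.2]
        constructor
        · intro hall q hq hqle
          rcases List.mem_cons.mp hq with hq' | hq'
          · subst hq'; exact fun h => hdvd h
          · exact hall q hq' hqle
        · intro hall q hq hqle
          exact hall q (List.mem_cons_of_mem _ hq) hqle

lemma pvIsp_eq (limit : Nat) (k : Int) (hk : 0 ≤ k) (hlt : k.toNat < (limit + 1) * (limit + 1)) :
    pvIsp ((List.range (limit + 1)).filter (fun q => decide (Nat.Prime q))) k =
      decide (Nat.Prime k.toNat) := by
  unfold pvIsp
  by_cases h2 : k < 2
  · rw [if_pos h2]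
    have hnp : ¬ Nat.Prime k.toNat := by
      intro hp
      have := hp.two_le
      omega
    exact (decide_eq_false hnp).symm
  · rw [if_neg h2]
    have hpw : ((List.range (limit + 1)).filter (fun q => decide (Nat.Prime q))).Pairwise (· < ·) :=
      (List.pairwise_lt_range).filter _
    rw [Bool.eq_iff_iff]
    rw [pvIspLoop_eq k _ hpw]
    have hkk : (k.toNat : Int) = k := Int.toNat_of_nonneg hk
    simp only [List.mem_filter, List.mem_range, decide_eq_true_eq]
    constructor
    · intro hall
      refine (pvPrimeChar k.toNat (limit + 1) (by omega) hlt).mp ?_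
      intro q hq hqlt hqsq hqdvd
      refine hall q ⟨hqlt, hq⟩ ?_ ?_
      · have h1 : ((q * q : Nat) : Int) ≤ (k.toNat : Int) := by exact_mod_cast hqsq
        push_cast at h1
        omega
      · rw [← hkk]
        exact_mod_cast hqdvd
    · intro hprime q hq hqle hqdvd
      have hq1 : q ∣ k.toNat := by
        rw [← hkk] at hqdvd
        exact_mod_cast hqdvd
      have hqsq : q * q ≤ k.toNat := by
        have h1 : ((q * q : Nat) : Int) ≤ k := by push_cast; omega
        omega
      rcases hprime.eq_one_or_self_of_dvd q hq1 with h | h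
      · exact hq.2.one_lt.ne' h
      · have h2t := hprime.two_le
        nlinarith

lemma pvIsPrimeA_eq (n : Int) (hn : 0 ≤ n) : pvIsPrimeA n = decide (Nat.Prime n.toNat) := by
  unfold pvIsPrimeA
  have hnt : n = (n.toNat : Int) := (Int.toNat_of_nonneg hn).symm
  by_cases h1 : n ≤ 1
  · have hnp : ¬ Nat.Prime n.toNat := fun hp => by have := hp.two_le; omega
    rw [if_pos (by simp [h1]), (decide_eq_false hnp).symm]
  · by_cases h2 : ¬(n = 2) ∧ PySem.Int.mod n 2 = 0
    · have hdvd : (2 : Int) ∣ n := (PySem.Int.mod_eq_zero_iff_dvd n 2).mp h2.2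
      have hnp : ¬ Nat.Prime n.toNat := by
        intro hp
        have h2t : (2 : Nat) ∣ n.toNat := by
          rw [hnt] at hdvd; exact_mod_cast hdvd
        rcases hp.eq_one_or_self_of_dvd 2 h2t with h | h
        · omega
        · exact h2.1 (by omega)
      have hcond : (decide (n ≤ 1) || (!(n == 2) && (PySem.Int.mod n 2 == 0)) ||
          (!(n == 3) && (PySem.Int.mod n 3 == 0))) = true :=
        Bool.or_eq_true_iff.mpr (Or.inl (Bool.or_eq_true_iff.mpr (Or.inr
          (Bool.and_eq_true_iff.mpr ⟨by simp [h2.1], by simpa using hdvd⟩))))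
      rw [if_pos hcond, (decide_eq_false hnp).symm]
    · by_cases h3 : ¬(n = 3) ∧ PySem.Int.mod n 3 = 0
      · have hdvd : (3 : Int) ∣ n := (PySem.Int.mod_eq_zero_iff_dvd n 3).mp h3.2
        have hnp : ¬ Nat.Prime n.toNat := by
          intro hp
          have h3t : (3 : Nat) ∣ n.toNat := by
            rw [hnt] at hdvd; exact_mod_cast hdvd
          rcases hp.eq_one_or_self_of_dvd 3 h3t with h | h
          · omega
          · exact h3.1 (by omega)
        have hcond : (decide (n ≤ 1) || (!(n == 2) && (PySem.Int.mod n 2 == 0)) ||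
            (!(n == 3) && (PySem.Int.mod n 3 == 0))) = true :=
          Bool.or_eq_true_iff.mpr (Or.inr
            (Bool.and_eq_true_iff.mpr ⟨by simp [h3.1], by simpa using hdvd⟩))
        rw [if_pos hcond, (decide_eq_false hnp).symm]
      · have hcond : ¬((decide (n ≤ 1) || (!(n == 2) && (PySem.Int.mod n 2 == 0)) ||
            (!(n == 3) && (PySem.Int.mod n 3 == 0))) = true) := by
          intro hc
          rcases Bool.or_eq_true_iff.mp hc with hc | hc
          · rcases Bool.or_eq_true_iff.mp hc with hc | hc
            · exact h1 (by simpa using hc)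
            · have hh := Bool.and_eq_true_iff.mp hc
              exact h2 ⟨by simpa using hh.1, by simpa using hh.2⟩
          · have hh := Bool.and_eq_true_iff.mp hc
            exact h3 ⟨by simpa using hh.1, by simpa using hh.2⟩
        rw [if_neg hcond]
        rw [Bool.eq_iff_iff, List.all_eq_true]
        have h2' : n = 2 ∨ ¬ ((2 : Int) ∣ n) := by
          by_cases he : n = 2
          · exact Or.inl he
          · exact Or.inr fun hd => h2 ⟨he, (PySem.Int.mod_eq_zero_iff_dvd n 2).mpr hd⟩
        simp only [decide_eq_true_eq]
        constructor
        · intro hall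
          rw [Nat.prime_def_le_sqrt]
          refine ⟨by omega, ?_⟩
          intro m hm hmsq hmdvd
          by_cases hme : 2 ∣ m
          · have h2n : (2 : Int) ∣ n := by
              rw [hnt]
              exact_mod_cast (dvd_trans hme hmdvd)
            rcases h2' with he | he
            · have ht2 : n.toNat = 2 := by omega
              rw [ht2] at hmsq
              have hms := Nat.le_sqrt.mp hmsq
              nlinarith
            · exact he h2n
          · have hm3 : 3 ≤ m := by omega
            have hmod : m % 2 = 1 := by omega
            obtain ⟨a, ha⟩ : ∃ a, m = 2 * a + 1 := ⟨m / 2, by omega⟩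
            have hmem : ((m : Nat) : Int) ∈
                PySem.List.pyRange 3 ((Nat.sqrt n.toNat : Int) + 1) 2 := by
              rw [PySem.List.mem_pyRange_iff_of_pos (by omega)]
              refine ⟨by exact_mod_cast hm3, ?_, ?_⟩
              · have : (m : Int) ≤ (Nat.sqrt n.toNat : Int) := by exact_mod_cast hmsq
                omega
              · exact ⟨(a : Int) - 1, by subst ha; push_cast; ring⟩
            have hi := hall _ hmem
            simp only [Bool.not_eq_eq_eq_not, Bool.not_true, beq_eq_false_iff_ne, ne_eq] at hi
            exact hi ((PySem.Int.mod_eq_zero_iff_dvd n (m : Int)).mpr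
              (by rw [hnt]; exact_mod_cast hmdvd))
        · intro hp i hi
          rw [PySem.List.mem_pyRange_iff_of_pos (by omega)] at hi
          simp only [Bool.not_eq_eq_eq_not, Bool.not_true, beq_eq_false_iff_ne, ne_eq]
          intro hmod
          have hidvd : i ∣ n := (PySem.Int.mod_eq_zero_iff_dvd n i).mp hmod
          have hi3 : 3 ≤ i := hi.1
          have hiN : (i.toNat : Int) = i := Int.toNat_of_nonneg (by omega)
          have hdvdN : i.toNat ∣ n.toNat := by
            rw [hnt] at hidvd
            rw [← hiN] at hidvd
            exact_mod_cast hidvd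
          rcases hp.eq_one_or_self_of_dvd i.toNat hdvdN with h | h
          · omega
          · have hlt : Nat.sqrt n.toNat < n.toNat := Nat.sqrt_lt_self (by omega)
            have : i ≤ (Nat.sqrt n.toNat : Int) := by omega
            omega

lemma pvFloordiv_split (n : Int) : PySem.Int.floordiv (n + 1) 2 = n - PySem.Int.floordiv n 2 := by
  have a1 := PySem.Int.floordiv_mul_add_mod n 2
  have a2 := PySem.Int.floordiv_mul_add_mod (n + 1) 2
  have b1 := PySem.Int.mod_nonneg (a := n) (b := 2) (by norm_num)
  have b2 := PySem.Int.mod_nonneg (a := n + 1) (b := 2) (by norm_num)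
  have c1 := PySem.Int.mod_lt (a := n) (b := 2) (by norm_num)
  have c2 := PySem.Int.mod_lt (a := n + 1) (b := 2) (by norm_num)
  omega

lemma pvFloordiv_two_bounds (n : Int) :
    2 * PySem.Int.floordiv n 2 ≤ n ∧ n ≤ 2 * PySem.Int.floordiv n 2 + 1 := by
  have a1 := PySem.Int.floordiv_mul_add_mod n 2
  have b1 := PySem.Int.mod_nonneg (a := n) (b := 2) (by norm_num)
  have c1 := PySem.Int.mod_lt (a := n) (b := 2) (by norm_num)
  omega

lemma pvLoopA_small (n : Int) : ∀ low : Int, low ≤ 1 → pvLoopA n low (n - low) = 0 := by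
  have key : ∀ m : Nat, ∀ low : Int, (low + 1).toNat ≤ m → low ≤ 1 →
      pvLoopA n low (n - low) = 0 := by
    intro m
    induction m with
    | zero =>
      intro low hm hl
      rw [pvLoopA, dif_neg (by omega)]
    | succ m ih =>
      intro low hm hl
      by_cases hneg : low < 0
      · rw [pvLoopA, dif_neg (by omega)]
      · have hfalse : pvIsPrimeA low = false := by
          have h01 : low = 0 ∨ low = 1 := by omega
          rcases h01 with h | h <;> subst h <;> decide
        rw [pvLoopA, dif_pos ⟨by omega, by omega⟩, hfalse]
        have he : n - low + 1 = n - (low - 1) := by ring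
        simp only [Bool.false_and, Bool.false_eq_true, if_false]
        rw [he]
        exact ih (low - 1) (by omega) (by omega)
  exact fun low hl => key (low + 1).toNat low (le_refl _) hl

lemma pvNotPrime_even (t : Nat) (hdvd : 2 ∣ t) (ht : 4 ≤ t) : ¬ Nat.Prime t := by
  intro hp
  rcases hp.eq_one_or_self_of_dvd 2 hdvd with h | h <;> omega

lemma pvScan_eq (n : Int) (hn : 4 ≤ n) (limit : Nat)
    (hlt : n.toNat < (limit + 1) * (limit + 1)) :
    ∀ low : Int, low ≤ n →
      pvLoopA n low (n - low) =
        pvScan n ((List.range (limit + 1)).filter (fun q => decide (Nat.Prime q))) low := by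
  have key : ∀ m : Nat, ∀ low : Int, low.toNat ≤ m → low ≤ n →
      pvLoopA n low (n - low) =
        pvScan n ((List.range (limit + 1)).filter (fun q => decide (Nat.Prime q))) low := by
    intro m
    induction m with
    | zero =>
      intro low hm hln
      rw [pvScan, if_neg (by omega)]
      exact pvLoopA_small n low (by omega)
    | succ m ih =>
      intro low hm hln
      by_cases hl2 : 2 ≤ low
      · rw [pvScan, if_pos hl2, pvLoopA, dif_pos ⟨by omega, by omega⟩]
        have e1 : pvIsPrimeA low =
            pvIsp ((List.range (limit + 1)).filter (fun q => decide (Nat.Prime q))) low := by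
          rw [pvIsPrimeA_eq low (by omega), pvIsp_eq limit low (by omega) (by omega)]
        have e2 : pvIsPrimeA (n - low) =
            pvIsp ((List.range (limit + 1)).filter (fun q => decide (Nat.Prime q))) (n - low) := by
          rw [pvIsPrimeA_eq (n - low) (by omega), pvIsp_eq limit (n - low) (by omega) (by omega)]
        rw [e1, e2]
        by_cases hb : (pvIsp ((List.range (limit + 1)).filter (fun q => decide (Nat.Prime q))) low
            && pvIsp ((List.range (limit + 1)).filter (fun q => decide (Nat.Prime q))) (n - low)) = true
        · rw [if_pos hb, if_pos hb]
        · rw [if_neg hb, if_neg hb]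
          have he : n - low + 1 = n - (low - 1) := by ring
          rw [he]
          exact ih (low - 1) (by omega) (by omega)
      · rw [pvScan, if_neg hl2]
        exact pvLoopA_small n low (by omega)
  exact fun low hln => key low.toNat low (le_refl _) hln

lemma pvLoopA_odd (n : Int) (hn : 5 ≤ n) (hodd : n % 2 = 1) :
    ∀ low : Int, 2 ≤ low → 2 * low ≤ n →
      pvLoopA n low (n - low) = if Nat.Prime (n - 2).toNat then 2 * (n - 2) else 0 := by
  have key : ∀ m : Nat, ∀ low : Int, low.toNat ≤ m → 2 ≤ low → 2 * low ≤ n →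
      pvLoopA n low (n - low) = if Nat.Prime (n - 2).toNat then 2 * (n - 2) else 0 := by
    intro m
    induction m with
    | zero => intro low hm hl2 _; omega
    | succ m ih =>
      intro low hm hl2 hln
      by_cases hl3 : 3 ≤ low
      · -- one of low, n - low is even and ≥ 4: no pair here
        have hfalse : (pvIsPrimeA low && pvIsPrimeA (n - low)) = false := by
          rcases Int.emod_two_eq_zero_or_one low with hpar | hpar
          · have : pvIsPrimeA low = false := by
              rw [pvIsPrimeA_eq low (by omega)]
              exact decide_eq_false (pvNotPrime_even low.toNat (by omega) (by omega))
            rw [this, Bool.false_and]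
          · have : pvIsPrimeA (n - low) = false := by
              rw [pvIsPrimeA_eq (n - low) (by omega)]
              exact decide_eq_false (pvNotPrime_even (n - low).toNat (by omega) (by omega))
            rw [this, Bool.and_false]
        rw [pvLoopA, dif_pos ⟨by omega, by omega⟩, hfalse]
        have he : n - low + 1 = n - (low - 1) := by ring
        simp only [Bool.false_eq_true, if_false]
        rw [he]
        exact ih (low - 1) (by omega) (by omega) (by omega)
      · -- low = 2
        have hl : low = 2 := by omega
        subst hl
        rw [pvLoopA, dif_pos ⟨by omega, by omega⟩]
        have e1 : pvIsPrimeA 2 = true := by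
          rw [pvIsPrimeA_eq 2 (by omega)]
          have h22 : (2 : Int).toNat = 2 := rfl
          rw [h22]
          exact decide_eq_true Nat.prime_two
        have e2 : pvIsPrimeA (n - 2) = decide (Nat.Prime (n - 2).toNat) :=
          pvIsPrimeA_eq (n - 2) (by omega)
        rw [e1, e2, Bool.true_and]
        by_cases hP : Nat.Prime (n - 2).toNat
        · rw [if_pos (decide_eq_true hP), if_pos hP]
        · rw [if_neg (by simp [hP]), if_neg hP]
          have he : n - 2 + 1 = n - 1 := by ring
          rw [he]
          exact pvLoopA_small n 1 (by omega)
  exact fun low hl2 hln => key low.toNat low (le_refl _) hl2 hln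

-- ===== VERDICT (by name: the statement is the Claim_ definition above) =====
theorem prime_product_spec : Claim_equal_prime_product := by
  unfold Claim_equal_prime_product Spec_prime_product
  intro n _
  obtain ⟨hq1, hq2⟩ := pvFloordiv_two_bounds n
  by_cases hsmall : n < 4
  · -- both sides are 0
    unfold prime_product prime_product_alt
    rw [if_pos hsmall, pvFloordiv_split, pvLoopA_small n _ (by omega)]
  · have hN4 : 4 ≤ n.toNat := by omega
    obtain ⟨hl1, hl2, hl3⟩ := pvFindLimit_spec n.toNat 1 (by omega)
    set limit := pvFindLimit n.toNat 1 with hlimdef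
    have hprimes := pvSieve_init limit (by omega)
    unfold prime_product prime_product_alt
    rw [if_neg hsmall]
    show pvLoopA n (PySem.Int.floordiv n 2) (PySem.Int.floordiv (n + 1) 2) =
      if PySem.Int.mod n 2 == 1 then
        if pvIsp (pvSieve limit 2 (Array.replicate (limit + 1) true) []) (n - 2) then
          2 * (n - 2) else 0
      else pvScan n (pvSieve limit 2 (Array.replicate (limit + 1) true) [])
        (PySem.Int.floordiv n 2)
    rw [hprimes, pvFloordiv_split]
    have hmod2 : PySem.Int.mod n 2 = n % 2 := PySem.Int.mod_eq_emod_of_pos (by norm_num)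
    rcases Int.emod_two_eq_zero_or_one n with hpar | hpar
    · -- even n
      rw [if_neg (by simp [hmod2, hpar])]
      exact pvScan_eq n (by omega) limit (by omega) _ (by omega)
    · -- odd n
      rw [if_pos (by simp [hmod2, hpar])]
      rw [pvLoopA_odd n (by omega) hpar _ (by omega) (by omega)]
      rw [pvIsp_eq limit (n - 2) (by omega) (by omega)]
      by_cases hP : Nat.Prime (n - 2).toNat
      · rw [if_pos hP, if_pos (by simp [hP])]
      · rw [if_neg hP, if_neg (by simp [hP])]
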